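-- pv_equiv track=rewrite | github.com/PrajwalVandana/Shortcuts | shortcuts.py | sum_palindromes
-- ===== SOURCE A (Python) =====
-- def num_palindromes(n, leading_zeros=False):
--     """Returns the number of all n-digit palindromes.
--
--     leading_zeros: if ```True```, 037...730 is a valid palindrome (for example)
--     """
--     return 10**((n-1)//2)*(9+leading_zeros)
--
-- def sum_palindromes(n, leading_zeros=False):
--     """Returns the sum of all n-digit palindromes.
--
--     leading_zeros: if ```True```, 037...730 is a valid palindrome (for example)
--     """
--     assert isinstance(n, int) and n > 0, 'n must be a positive integer.'
--
--     if n == 1: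
--         return 45  # sum of 1 through 9
--     elif n == 2:
--         return 495  # 45*11
--     else:
--         return 45 * (10**(n-1)+1) * num_palindromes(n-2, True) + sum_palindromes(n-2, True) * 10 * (9+leading_zeros)
-- ===== SOURCE B (Python) =====
-- def sum_palindromes(n, leading_zeros=False):
--     """Returns the sum of all n-digit palindromes.
--
--     leading_zeros: if ```True```, 037...730 is a valid palindrome (for example)
--     """
--     assert isinstance(n, int) and n > 0, 'n must be a positive integer.'
--
--     def total_with_zeros(m):
--         # sum of all m-digit strings-of-digits palindromes, leading zeros allowed:
--         # each of the m digit places contributes 45 * (count/10) at its weight,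
--         # giving 45 * 10**(ceil(m/2)-1) * repunit(m) = 5 * 10**(ceil(m/2)-1) * (10**m - 1)
--         return 5 * 10 ** ((m + 1) // 2 - 1) * (10 ** m - 1)
--
--     if n <= 2 or leading_zeros:
--         return total_with_zeros(n)
--     # drop the palindromes starting (and ending) with 0: each is 10 times an
--     # (n-2)-digit leading-zeros palindrome
--     return total_with_zeros(n) - 10 * total_with_zeros(n - 2)
-- ===== Notes on version B (the rewrite author's own statement) =====
-- stated objective: faster
-- what changed: Replaced the depth-(n/2) recursion with a closed-form expression 5*10^(ceil(n/2)-1)*(10^n-1) for the leading-zeros total, subtracting 10x the (n-2)-digit total when leading zeros are disallowed.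
import Mathlib
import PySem

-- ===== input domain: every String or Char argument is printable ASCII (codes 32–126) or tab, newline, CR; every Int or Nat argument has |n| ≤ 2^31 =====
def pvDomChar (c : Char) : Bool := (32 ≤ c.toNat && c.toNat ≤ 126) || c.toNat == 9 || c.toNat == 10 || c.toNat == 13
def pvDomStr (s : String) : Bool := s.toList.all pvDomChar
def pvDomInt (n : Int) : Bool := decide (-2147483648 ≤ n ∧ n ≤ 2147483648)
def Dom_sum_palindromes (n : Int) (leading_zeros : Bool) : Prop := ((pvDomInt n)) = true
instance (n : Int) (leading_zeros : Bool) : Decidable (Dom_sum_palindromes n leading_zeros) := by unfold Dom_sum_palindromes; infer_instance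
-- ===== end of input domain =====

-- B replaces A's depth-(n/2) recursion with a closed form: O(1) big-int operations instead of O(n).

-- ===== PORT A =====
def num_palindromes (n : Int) (leading_zeros : Bool) : Int :=
  10 ^ (PySem.Int.floordiv (n - 1) 2).toNat * (9 + (if leading_zeros then (1 : Int) else 0))

def sum_palindromes (n : Int) (leading_zeros : Bool) : Int :=
  if _h0 : n ≤ 0 then 0  -- totality guard: Python's assert raises here; excluded by Pre_
  else if n = 1 then 45
  else if n = 2 then 495
  else 45 * (10 ^ (n - 1).toNat + 1) * num_palindromes (n - 2) true
       + sum_palindromes (n - 2) true * 10 * (9 + (if leading_zeros then (1 : Int) else 0))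
termination_by n.toNat
decreasing_by omega

-- ===== PORT B =====
-- total_with_zeros in Source B
def pvTotalWithZeros (m : Int) : Int :=
  5 * 10 ^ (PySem.Int.floordiv (m + 1) 2 - 1).toNat * (10 ^ m.toNat - 1)

def sum_palindromes_alt (n : Int) (leading_zeros : Bool) : Int :=
  if n ≤ 2 || leading_zeros then pvTotalWithZeros n
  else pvTotalWithZeros n - 10 * pvTotalWithZeros (n - 2)

-- ===== PRECONDITION & SPEC =====
-- Pre_ excludes exactly the inputs on which A's assert raises (n ≤ 0).
def Pre_sum_palindromes (n : Int) (leading_zeros : Bool) : Prop := 0 < n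
instance (n : Int) (leading_zeros : Bool) : Decidable (Pre_sum_palindromes n leading_zeros) := by unfold Pre_sum_palindromes; infer_instance
def pvWitness_sum_palindromes : Int × Bool := (5, false)

def Spec_sum_palindromes (n : Int) (leading_zeros : Bool) (out : Int) : Prop := out = sum_palindromes_alt n leading_zeros
instance (n : Int) (leading_zeros : Bool) (out : Int) : Decidable (Spec_sum_palindromes n leading_zeros out) := by unfold Spec_sum_palindromes; infer_instance

-- ===== CLAIM (what is proved, stated in full; the proofs are below) =====
def Claim_equal_sum_palindromes : Prop := ∀ (n : Int) (leading_zeros : Bool), Dom_sum_palindromes n leading_zeros → Pre_sum_palindromes n leading_zeros → Spec_sum_palindromes n leading_zeros (sum_palindromes n leading_zeros)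

-- ===== LEMMAS AND PROOFS =====

theorem sumA_true_eq_T (k : Nat) : sum_palindromes ((k : Int) + 1) true = pvTotalWithZeros ((k : Int) + 1) := by
  induction k using Nat.strong_induction_on with
  | _ k ih =>
    match k with
    | 0 =>
      have h : ((0:Nat):Int) + 1 = 1 := by norm_num
      rw [h, sum_palindromes]; decide
    | 1 =>
      have h : ((1:Nat):Int) + 1 = 2 := by norm_num
      rw [h, sum_palindromes]; decide
    | (j+2) =>
      rw [sum_palindromes]
      have h0 : ¬ ((j:Int) + 2 + 1 ≤ 0) := by omega
      have h1 : ¬ ((j:Int) + 2 + 1 = 1) := by omega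
      have h2 : ¬ ((j:Int) + 2 + 1 = 2) := by omega
      push_cast
      rw [dif_neg h0, if_neg h1, if_neg h2]
      have harg : (j:Int) + 2 + 1 - 2 = (j:Int) + 1 := by ring
      rw [harg, ih j (by omega)]
      unfold num_palindromes pvTotalWithZeros
      have e1 : ((j:Int) + 1 - 1) = ((j:Nat) : Int) := by ring
      have e2 : ((j:Int) + 1 + 1) = (((j+2:Nat)) : Int) := by push_cast; ring
      have e3 : ((j:Int) + 2 + 1 + 1) = (((j+4:Nat)) : Int) := by push_cast; ring
      rw [e1, e2, e3]
      have f1 : PySem.Int.floordiv ((j:Int)) 2 = ((j/2 : Nat):Int) := by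
        exact_mod_cast PySem.Int.floordiv_natCast j 2
      have f2 : PySem.Int.floordiv (((j+2:Nat)):Int) 2 = (((j+2)/2 : Nat):Int) := by
        exact_mod_cast PySem.Int.floordiv_natCast (j+2) 2
      have f3 : PySem.Int.floordiv (((j+4:Nat)):Int) 2 = (((j+4)/2 : Nat):Int) := by
        exact_mod_cast PySem.Int.floordiv_natCast (j+4) 2
      rw [f1, f2, f3]
      have t1 : (((j/2 : Nat) : Int)).toNat = j/2 := by omega
      have t2 : (((j+2)/2 : Nat) : Int) - 1 = (((j/2 : Nat)) : Int) := by omega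
      have t3 : (((j+4)/2 : Nat) : Int) - 1 = (((j/2 + 1 : Nat)) : Int) := by omega
      rw [t2, t3]
      have t4 : ((j:Int) + 2 + 1 - 1).toNat = j + 2 := by omega
      have t5 : ((j:Int) + 1).toNat = j + 1 := by omega
      have t6 : ((j:Int) + 2 + 1).toNat = j + 3 := by omega
      rw [t4, t5, t6]
      simp only [Int.toNat_natCast, if_pos]
      have p2 : (10:Int) ^ (j+2) = 10 ^ (j+1) * 10 := pow_succ 10 (j+1)
      have p3 : (10:Int) ^ (j+3) = 10 ^ (j+1) * 100 := by
        rw [show j+3 = (j+1)+2 by ring, pow_add]; norm_num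
      have p4 : (10:Int) ^ (j/2 + 1) = 10 ^ (j/2) * 10 := pow_succ 10 (j/2)
      rw [p2, p3, p4]
      ring

theorem sum_palindromes_spec' (n : Int) (h : 0 < n) (lz : Bool) :
    sum_palindromes n lz = sum_palindromes_alt n lz := by
  obtain ⟨k, rfl⟩ : ∃ k : Nat, n = (k : Int) + 1 := ⟨(n-1).toNat, by omega⟩
  match k with
  | 0 =>
    have e : ((0:Nat):Int) + 1 = 1 := by norm_num
    rw [e, sum_palindromes]; cases lz <;> decide
  | 1 =>
    have e : ((1:Nat):Int) + 1 = 2 := by norm_num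
    rw [e, sum_palindromes]; cases lz <;> decide
  | (j+2) =>
    have h2 : ¬ (((j+2:Nat):Int) + 1 ≤ 2) := by push_cast; omega
    cases lz with
    | true =>
      have halt : sum_palindromes_alt ((j+2:Nat) + 1) true = pvTotalWithZeros ((j+2:Nat) + 1) := by
        unfold sum_palindromes_alt; simp
      rw [halt]; exact sumA_true_eq_T (j+2)
    | false =>
      have halt : sum_palindromes_alt ((j+2:Nat) + 1) false
          = pvTotalWithZeros ((j+2:Nat) + 1) - 10 * pvTotalWithZeros (((j+2:Nat):Int) + 1 - 2) := by
        unfold sum_palindromes_alt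
        rw [if_neg (by simpa using h2)]
      have hT := sumA_true_eq_T (j+2)
      rw [sum_palindromes] at hT ⊢
      have h0 : ¬ (((j+2:Nat):Int) + 1 ≤ 0) := by push_cast; omega
      have hne1 : ¬ (((j+2:Nat):Int) + 1 = 1) := by push_cast; omega
      have hne2 : ¬ (((j+2:Nat):Int) + 1 = 2) := by push_cast; omega
      rw [dif_neg h0, if_neg hne1, if_neg hne2] at hT ⊢
      have harg : ((j+2:Nat):Int) + 1 - 2 = (j:Int) + 1 := by push_cast; ring
      rw [harg, sumA_true_eq_T j] at hT ⊢
      rw [halt, harg]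
      have hif : (9 + (if false = true then (1:Int) else 0)) = 9 := by norm_num
      have hif2 : (9 + (if true = true then (1:Int) else 0)) = 10 := by norm_num
      rw [hif] ; rw [hif2] at hT
      linarith [hT]

-- ===== VERDICT (by name: the statement is the Claim_ definition above) =====
theorem sum_palindromes_spec : Claim_equal_sum_palindromes := by
  intro n lz _ hpre
  unfold Spec_sum_palindromes
  exact sum_palindromes_spec' n hpre lz
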